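-- pv_equiv track=rewrite | github.com/AU-DIS/ReliK | approach/datahandler.py | findingRankNegTail
-- ===== SOURCE A (Python) =====
-- def findingRankNegTail(orderedList, key, all_triples_set, fix):
--     counter = 1
--     for ele in orderedList:
--         if key[0] == ele[0] and key[1] == ele[1]:
--             return counter
--         tup = (ele[0],ele[1],fix)
--         if tup in all_triples_set:
--             continue
--         counter += 1
--     return None
-- ===== SOURCE B (Python) =====
-- def findingRankNegTail(orderedList, key, all_triples_set, fix):
--     idx = next((i for i, ele in enumerate(orderedList)
--                 if key[0] == ele[0] and key[1] == ele[1]), None)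
--     if idx is None:
--         return None
--     return 1 + sum(1 for ele in orderedList[:idx]
--                    if (ele[0], ele[1], fix) not in all_triples_set)
-- ===== Notes on version B (the rewrite author's own statement) =====
-- stated objective: alternative
-- what changed: Replaces A's single scan with a running skip-counter by a locate-then-count decomposition: first find the key's position, then count the non-skipped elements in the prefix before it.
import Mathlib
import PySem

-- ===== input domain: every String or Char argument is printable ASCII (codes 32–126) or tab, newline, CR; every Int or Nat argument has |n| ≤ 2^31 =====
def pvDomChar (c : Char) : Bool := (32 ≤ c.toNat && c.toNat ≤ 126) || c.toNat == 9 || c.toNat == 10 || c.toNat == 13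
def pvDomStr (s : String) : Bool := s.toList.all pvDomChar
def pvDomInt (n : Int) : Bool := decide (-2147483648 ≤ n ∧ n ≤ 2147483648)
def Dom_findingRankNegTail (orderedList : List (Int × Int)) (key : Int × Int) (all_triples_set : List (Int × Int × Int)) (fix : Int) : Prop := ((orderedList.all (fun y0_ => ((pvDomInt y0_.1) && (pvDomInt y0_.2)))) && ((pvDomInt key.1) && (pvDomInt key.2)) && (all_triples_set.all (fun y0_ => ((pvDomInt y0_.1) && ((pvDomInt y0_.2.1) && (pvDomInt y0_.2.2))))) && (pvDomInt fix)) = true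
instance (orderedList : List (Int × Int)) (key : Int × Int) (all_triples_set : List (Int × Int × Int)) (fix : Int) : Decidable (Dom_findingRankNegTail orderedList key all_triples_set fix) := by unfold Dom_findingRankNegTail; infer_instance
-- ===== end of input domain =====

-- B replaces A's single scan carrying a skip-counter by a locate-then-count decomposition (alternative structure, same cost).

-- ===== PORT A =====
-- A's for-loop over orderedList with the mutable `counter`, early return on key match.
def findingRankNegTailGo (key : Int × Int) (all_triples_set : List (Int × Int × Int)) (fix : Int) : List (Int × Int) → Int → Option Int
  | [], _ => none
  | ele :: rest, counter =>
    if key.1 == ele.1 && key.2 == ele.2 then some counter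
    else if (ele.1, ele.2, fix) ∈ all_triples_set then
      findingRankNegTailGo key all_triples_set fix rest counter
    else
      findingRankNegTailGo key all_triples_set fix rest (counter + 1)

def findingRankNegTail (orderedList : List (Int × Int)) (key : Int × Int) (all_triples_set : List (Int × Int × Int)) (fix : Int) : Option Int :=
  findingRankNegTailGo key all_triples_set fix orderedList 1

-- ===== PORT B =====
-- B: locate the first index whose pair equals key (next+enumerate), then count
-- the prefix elements whose triple is not in all_triples_set.
def findingRankNegTail_alt (orderedList : List (Int × Int)) (key : Int × Int) (all_triples_set : List (Int × Int × Int)) (fix : Int) : Option Int :=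
  match orderedList.findIdx? (fun ele => key.1 == ele.1 && key.2 == ele.2) with
  | none => none
  | some idx =>
    some (1 + ((orderedList.take idx).countP
      (fun ele => !((ele.1, ele.2, fix) ∈ all_triples_set : Bool)) : Int))

-- ===== PRECONDITION & SPEC =====
def Spec_findingRankNegTail (orderedList : List (Int × Int)) (key : Int × Int) (all_triples_set : List (Int × Int × Int)) (fix : Int) (out : Option Int) : Prop := out = findingRankNegTail_alt orderedList key all_triples_set fix
instance (orderedList : List (Int × Int)) (key : Int × Int) (all_triples_set : List (Int × Int × Int)) (fix : Int) (out : Option Int) : Decidable (Spec_findingRankNegTail orderedList key all_triples_set fix out) := by unfold Spec_findingRankNegTail; infer_instance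

-- ===== CLAIM (what is proved, stated in full; the proofs are below) =====
def Claim_equal_findingRankNegTail : Prop := ∀ (orderedList : List (Int × Int)) (key : Int × Int) (all_triples_set : List (Int × Int × Int)) (fix : Int), Dom_findingRankNegTail orderedList key all_triples_set fix → Spec_findingRankNegTail orderedList key all_triples_set fix (findingRankNegTail orderedList key all_triples_set fix)

-- ===== LEMMAS AND PROOFS =====
theorem findingRankNegTailGo_eq (key : Int × Int) (ts : List (Int × Int × Int)) (fix : Int) :
    ∀ (l : List (Int × Int)) (c : Int),
      findingRankNegTailGo key ts fix l c =
        match l.findIdx? (fun ele => key.1 == ele.1 && key.2 == ele.2) with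
        | none => none
        | some idx =>
          some (c + ((l.take idx).countP
            (fun ele => !((ele.1, ele.2, fix) ∈ ts : Bool)) : Int)) := by
  intro l
  induction l with
  | nil => intro c; simp [findingRankNegTailGo]
  | cons ele rest ih =>
    intro c
    by_cases hp : (key.1 == ele.1 && key.2 == ele.2) = true
    · simp [findingRankNegTailGo, hp, List.findIdx?_cons]
    · by_cases hm : (ele.1, ele.2, fix) ∈ ts
      · simp only [findingRankNegTailGo, hp, if_false, hm, if_true, ih,
          List.findIdx?_cons]
        cases hfi : rest.findIdx? (fun e => key.1 == e.1 && key.2 == e.2) with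
        | none => simp [hp, hfi]
        | some i => simp [hp, hfi, List.countP_cons, hm]
      · simp only [findingRankNegTailGo, hp, if_false, hm, if_false, ih,
          List.findIdx?_cons]
        cases hfi : rest.findIdx? (fun e => key.1 == e.1 && key.2 == e.2) with
        | none => simp
        | some i =>
          simp [hm]
          ring

-- ===== VERDICT (by name: the statement is the Claim_ definition above) =====
theorem findingRankNegTail_spec : Claim_equal_findingRankNegTail := by
  intro ol key ts fix _
  unfold Spec_findingRankNegTail findingRankNegTail findingRankNegTail_alt
  rw [findingRankNegTailGo_eq]
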